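-- pv_equiv track=rewrite | github.com/LUMII-Syslab/QuerySAT | utils/sat.py | remove_unused_vars
-- ===== SOURCE A (Python) =====
-- def remove_unused_vars(nvars, clauses):
--     used_vars = set()
--     n = 0
--     max_v = 0
--     for clause in clauses:
--         for lit in clause:
--             if lit == 0:
--                 continue
--             v = abs(lit)
--             if v > max_v:
--                 max_v = v
--             if v not in used_vars:
--                 used_vars.add(v)
--                 n += 1
--     if n == nvars and max_v == n:
--         return nvars, clauses  # do not change since all the variables are used
--     # otherwise not all variables are used (or the wrong number specified)
--
--     n = 0
--     d = {}
--     new_clauses = []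
--     for clause in clauses:
--         new_clause = []
--         for lit in clause:
--             if lit == 0:
--                 continue
--             v = abs(lit)
--             if v in d:
--                 new_v = d[v]
--             else:
--                 n += 1
--                 new_v = n
--                 d[v] = new_v
--             if lit > 0:
--                 new_clause.append(new_v)
--             else:
--                 new_clause.append(-new_v)
--         new_clauses.append(new_clause)
--
--     return n, new_clauses
-- ===== SOURCE B (Python) =====
-- def remove_unused_vars(nvars, clauses):
--     # single pass: build remap and renumbered clauses while tracking max var
--     d = {}
--     new_clauses = []
--     max_v = 0
--     for clause in clauses:
--         new_clause = []
--         for lit in clause: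
--             if lit == 0:
--                 continue
--             v = abs(lit)
--             if v > max_v:
--                 max_v = v
--             new_v = d.get(v)
--             if new_v is None:
--                 new_v = len(d) + 1
--                 d[v] = new_v
--             new_clause.append(new_v if lit > 0 else -new_v)
--         new_clauses.append(new_clause)
--     n = len(d)
--     if n == nvars and max_v == n:
--         return nvars, clauses
--     return n, new_clauses
-- ===== Notes on version B (the rewrite author's own statement) =====
-- stated objective: alternative
-- what changed: A's two sequential scans over the clauses (count/max pass, then a renumbering pass) are merged into one pass that builds the remap dict, the renumbered clauses and the running max together, deriving n as len(d) and applying the all-used guard afterwards.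
import Mathlib
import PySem

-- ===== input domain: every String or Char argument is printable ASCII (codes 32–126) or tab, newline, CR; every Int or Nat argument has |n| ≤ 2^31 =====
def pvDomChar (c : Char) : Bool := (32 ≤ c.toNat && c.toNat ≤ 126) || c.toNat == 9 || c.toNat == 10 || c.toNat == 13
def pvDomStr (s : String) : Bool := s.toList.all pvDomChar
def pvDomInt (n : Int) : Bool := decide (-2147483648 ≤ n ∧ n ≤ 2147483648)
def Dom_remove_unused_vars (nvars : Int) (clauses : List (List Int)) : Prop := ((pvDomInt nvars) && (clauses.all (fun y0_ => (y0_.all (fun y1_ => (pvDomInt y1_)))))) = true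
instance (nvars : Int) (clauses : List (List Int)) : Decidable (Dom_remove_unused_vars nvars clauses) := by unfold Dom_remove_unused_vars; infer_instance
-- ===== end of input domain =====

-- B merges A's two sequential scans into one pass that builds the remap dict,
-- the renumbered clauses and the running max together (alternative decomposition, same cost).

-- ===== PORT A =====
-- first pass, per-literal step: update max_v, then record v in used_vars / bump n
def stepA1 (st : PySem.Set Int × Int × Int) (lit : Int) : PySem.Set Int × Int × Int :=
  if lit = 0 then st
  else
    let v := |lit|
    let st1 := if v > st.2.2 then (st.1, st.2.1, v) else st
    if PySem.Set.contains st1.1 v then st1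
    else (PySem.Set.add st1.1 v, st1.2.1 + 1, st1.2.2)

-- second pass, per-literal step over (n, d, new_clause)
def stepA2 (st : Int × PySem.Dict Int Int × List Int) (lit : Int) : Int × PySem.Dict Int Int × List Int :=
  if lit = 0 then st
  else
    let v := |lit|
    match (st.2.1).get? v with
    | some new_v => (st.1, st.2.1, st.2.2 ++ [if lit > 0 then new_v else -new_v])
    | none =>
        let n := st.1 + 1
        (n, (st.2.1).insert v n, st.2.2 ++ [if lit > 0 then n else -n])

def outerA1 (st : PySem.Set Int × Int × Int) (clause : List Int) : PySem.Set Int × Int × Int :=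
  clause.foldl stepA1 st

def outerA2 (st : Int × PySem.Dict Int Int × List (List Int)) (clause : List Int) :
    Int × PySem.Dict Int Int × List (List Int) :=
  let r := clause.foldl stepA2 (st.1, st.2.1, [])
  (r.1, r.2.1, st.2.2 ++ [r.2.2])

def remove_unused_vars (nvars : Int) (clauses : List (List Int)) : Int × List (List Int) :=
  let s1 := clauses.foldl outerA1 (PySem.Set.empty, 0, 0)
  let n := s1.2.1
  let max_v := s1.2.2
  if n = nvars ∧ max_v = n then (nvars, clauses)
  else
    let s2 := clauses.foldl outerA2 (0, PySem.Dict.empty, [])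
    (s2.1, s2.2.2)

-- ===== PORT B =====
-- single pass, per-literal step over (d, new_clause, max_v)
def stepB (st : PySem.Dict Int Int × List Int × Int) (lit : Int) : PySem.Dict Int Int × List Int × Int :=
  if lit = 0 then st
  else
    let v := |lit|
    let mv := if v > st.2.2 then v else st.2.2
    match (st.1).get? v with
    | some new_v => (st.1, st.2.1 ++ [if lit > 0 then new_v else -new_v], mv)
    | none =>
        let new_v := ((st.1).size : Int) + 1
        ((st.1).insert v new_v, st.2.1 ++ [if lit > 0 then new_v else -new_v], mv)

def outerB (st : PySem.Dict Int Int × List (List Int) × Int) (clause : List Int) :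
    PySem.Dict Int Int × List (List Int) × Int :=
  let r := clause.foldl stepB (st.1, [], st.2.2)
  (r.1, st.2.1 ++ [r.2.1], r.2.2)

def remove_unused_vars_alt (nvars : Int) (clauses : List (List Int)) : Int × List (List Int) :=
  let s := clauses.foldl outerB (PySem.Dict.empty, [], 0)
  let n := ((s.1).size : Int)
  if n = nvars ∧ s.2.2 = n then (nvars, clauses)
  else (n, s.2.1)

-- ===== PRECONDITION & SPEC =====
def Spec_remove_unused_vars (nvars : Int) (clauses : List (List Int)) (out : Int × List (List Int)) : Prop := out = remove_unused_vars_alt nvars clauses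
instance (nvars : Int) (clauses : List (List Int)) (out : Int × List (List Int)) : Decidable (Spec_remove_unused_vars nvars clauses out) := by unfold Spec_remove_unused_vars; infer_instance

-- ===== CLAIM (what is proved, stated in full; the proofs are below) =====
def Claim_equal_remove_unused_vars : Prop := ∀ (nvars : Int) (clauses : List (List Int)), Dom_remove_unused_vars nvars clauses → Spec_remove_unused_vars nvars clauses (remove_unused_vars nvars clauses)

-- ===== LEMMAS AND PROOFS =====

-- one literal keeps the three loop states in lockstep
theorem step_lockstep (d : PySem.Dict Int Int) (nc : List Int) (mv lit : Int)
    (hnd : d.keys.Nodup) :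
    stepA1 (d.keys, (d.size : Int), mv) lit
      = (((stepB (d, nc, mv) lit).1).keys, (((stepB (d, nc, mv) lit).1).size : Int), (stepB (d, nc, mv) lit).2.2)
    ∧ stepA2 ((d.size : Int), d, nc) lit
      = ((((stepB (d, nc, mv) lit).1).size : Int), (stepB (d, nc, mv) lit).1, (stepB (d, nc, mv) lit).2.1)
    ∧ ((stepB (d, nc, mv) lit).1).keys.Nodup := by
  by_cases h0 : lit = 0
  · simp [stepA1, stepA2, stepB, h0, hnd]
  · rcases hg : d.get? |lit| with _ | nv
    · have hc : d.contains |lit| = false := by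
        rw [PySem.Dict.contains_eq_isSome_get?, hg]; rfl
      have hm : |lit| ∉ d.keys := (PySem.Dict.get?_eq_none_iff_not_mem_keys d _).mp hg
      by_cases hv : mv < |lit| <;>
        · simp [stepA1, stepA2, stepB, h0, hg, hv, PySem.Set.contains, PySem.Set.add, hm, hc,
            PySem.Dict.keys_insert_of_not_contains d _ hc,
            PySem.Dict.size_insert]
          refine List.Nodup.append hnd (List.nodup_singleton _) ?_
          intro a ha hb
          simp only [List.mem_singleton] at hb
          exact hm (hb ▸ ha)
    · have hm : |lit| ∈ d.keys := by
        have := PySem.Dict.get?_eq_none_iff_not_mem_keys (d := d) (k := |lit|)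
        by_contra h; rw [this.mpr h] at hg; cases hg
      by_cases hv : mv < |lit| <;>
        simp [stepA1, stepA2, stepB, h0, hg, hv, PySem.Set.contains, hm, hnd]

-- one clause keeps the states in lockstep
theorem clause_lockstep (lits : List Int) : ∀ (d : PySem.Dict Int Int) (nc : List Int) (mv : Int),
    d.keys.Nodup →
    lits.foldl stepA1 (d.keys, (d.size : Int), mv)
      = (((lits.foldl stepB (d, nc, mv)).1).keys, (((lits.foldl stepB (d, nc, mv)).1).size : Int), (lits.foldl stepB (d, nc, mv)).2.2)
    ∧ lits.foldl stepA2 ((d.size : Int), d, nc)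
      = ((((lits.foldl stepB (d, nc, mv)).1).size : Int), (lits.foldl stepB (d, nc, mv)).1, (lits.foldl stepB (d, nc, mv)).2.1)
    ∧ ((lits.foldl stepB (d, nc, mv)).1).keys.Nodup := by
  induction lits with
  | nil => intro d nc mv hnd; exact ⟨rfl, rfl, hnd⟩
  | cons lit rest ih =>
    intro d nc mv hnd
    obtain ⟨h1, h2, h3⟩ := step_lockstep d nc mv lit hnd
    obtain ⟨r1, r2, r3⟩ := ih (stepB (d, nc, mv) lit).1 (stepB (d, nc, mv) lit).2.1 (stepB (d, nc, mv) lit).2.2 h3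
    simp only [List.foldl_cons, h1, h2]
    exact ⟨by simpa using r1, by simpa using r2, by simpa using r3⟩

-- the outer loops keep the states in lockstep
theorem outer_lockstep (clauses : List (List Int)) :
    ∀ (d : PySem.Dict Int Int) (ncl : List (List Int)) (mv : Int),
    d.keys.Nodup →
    clauses.foldl outerA1 (d.keys, (d.size : Int), mv)
      = (((clauses.foldl outerB (d, ncl, mv)).1).keys, (((clauses.foldl outerB (d, ncl, mv)).1).size : Int), (clauses.foldl outerB (d, ncl, mv)).2.2)
    ∧ clauses.foldl outerA2 ((d.size : Int), d, ncl)
      = ((((clauses.foldl outerB (d, ncl, mv)).1).size : Int), (clauses.foldl outerB (d, ncl, mv)).1, (clauses.foldl outerB (d, ncl, mv)).2.1)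
    ∧ ((clauses.foldl outerB (d, ncl, mv)).1).keys.Nodup := by
  induction clauses with
  | nil => intro d ncl mv hnd; exact ⟨rfl, rfl, hnd⟩
  | cons c rest ih =>
    intro d ncl mv hnd
    obtain ⟨h1, h2, h3⟩ := clause_lockstep c d [] mv hnd
    obtain ⟨r1, r2, r3⟩ := ih (c.foldl stepB (d, [], mv)).1 (ncl ++ [(c.foldl stepB (d, [], mv)).2.1]) (c.foldl stepB (d, [], mv)).2.2 h3
    simp only [List.foldl_cons, outerA1, outerA2, outerB, h1, h2]
    exact ⟨by simpa using r1, by simpa using r2, by simpa using r3⟩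

-- ===== VERDICT (by name: the statement is the Claim_ definition above) =====
theorem remove_unused_vars_spec : Claim_equal_remove_unused_vars := by
  intro nvars clauses _
  unfold Spec_remove_unused_vars remove_unused_vars remove_unused_vars_alt
  obtain ⟨h1, h2, _⟩ := outer_lockstep clauses PySem.Dict.empty [] 0 (by simp)
  simp only [show (PySem.Dict.empty : PySem.Dict Int Int).keys = PySem.Set.empty from rfl,
    show ((PySem.Dict.empty : PySem.Dict Int Int).size : Int) = 0 from rfl] at h1 h2
  rw [h1, h2]
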